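-- pv_equiv track=rewrite | github.com/mp51/AdventOfCode | 16/fft_02.py | apply_phase
-- ===== SOURCE A (Python) =====
-- def apply_phase(input_signal, phase):
--    processed_signal = []
--    p_val = sum(input_signal)
--    for i in range(len(input_signal)):
--       processed_signal.append(p_val)
--       p_val -= input_signal[i]
--
--    processed_signal = [int(str(i)[-1]) for i in processed_signal]
--    return processed_signal
-- ===== SOURCE B (Python) =====
-- def apply_phase(input_signal, phase):
--    return [int(str(sum(input_signal[i:]))[-1]) for i in range(len(input_signal))]
-- ===== Notes on version B (the rewrite author's own statement) =====
-- stated objective: simpler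
-- what changed: Replaces the single-pass decremented running-total accumulator with an independent per-index suffix-sum: each output digit is computed from sum(input_signal[i:]) directly, in one comprehension.
import Mathlib
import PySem

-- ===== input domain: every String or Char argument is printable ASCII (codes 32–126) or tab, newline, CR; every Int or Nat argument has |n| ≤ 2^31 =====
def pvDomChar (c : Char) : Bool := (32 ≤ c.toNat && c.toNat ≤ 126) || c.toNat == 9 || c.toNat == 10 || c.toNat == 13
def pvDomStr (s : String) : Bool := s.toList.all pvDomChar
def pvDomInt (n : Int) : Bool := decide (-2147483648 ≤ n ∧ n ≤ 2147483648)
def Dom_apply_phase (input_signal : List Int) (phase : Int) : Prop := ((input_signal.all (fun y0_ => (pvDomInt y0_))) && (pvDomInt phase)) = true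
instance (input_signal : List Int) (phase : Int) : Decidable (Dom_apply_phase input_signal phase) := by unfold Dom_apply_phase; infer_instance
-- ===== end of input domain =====

-- B replaces A's running-total accumulator by independent per-index suffix sums (simpler, one comprehension); same int(str(x)[-1]) last-digit step.

-- ===== PORT A =====
-- shared helper: the expression int(str(x)[-1]), identical in both Pythons
-- (str(x) is never empty and its last char is always a digit, so the getD defaults never fire)
def pvLastDigit (n : Int) : Int :=
  match PySem.Str.pyGet? (PySem.Int.toStr n) (-1) with
  | some c => (PySem.Int.ofStr? (String.ofList [c])).getD 0
  | none => 0

def apply_phase (input_signal : List Int) (phase : Int) : List Int :=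
  -- running total p_val, appended then decremented, over range(len(input_signal))
  let st := (List.range input_signal.length).foldl
    (fun (st : List Int × Int) (i : Nat) =>
      (st.1 ++ [st.2], st.2 - (PySem.List.pyGet? input_signal (i : Int)).getD 0))
    ([], input_signal.sum)
  st.1.map pvLastDigit

-- ===== PORT B =====
def apply_phase_alt (input_signal : List Int) (phase : Int) : List Int :=
  (List.range input_signal.length).map
    (fun (i : Nat) => pvLastDigit (PySem.List.slice input_signal (some (i : Int)) none).sum)

-- ===== PRECONDITION & SPEC =====
def Spec_apply_phase (input_signal : List Int) (phase : Int) (out : List Int) : Prop := out = apply_phase_alt input_signal phase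
instance (input_signal : List Int) (phase : Int) (out : List Int) : Decidable (Spec_apply_phase input_signal phase out) := by unfold Spec_apply_phase; infer_instance

-- ===== CLAIM (what is proved, stated in full; the proofs are below) =====
def Claim_equal_apply_phase : Prop := ∀ (input_signal : List Int) (phase : Int), Dom_apply_phase input_signal phase → Spec_apply_phase input_signal phase (apply_phase input_signal phase)

-- ===== LEMMAS AND PROOFS =====

-- loop invariant for A's fold: after k steps the list holds the first k suffix sums
-- and the accumulator holds the sum of the k-th suffix
theorem pv_loop_inv (s : List Int) (k : Nat) (hk : k ≤ s.length) :
    (List.range k).foldl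
      (fun (st : List Int × Int) (i : Nat) =>
        (st.1 ++ [st.2], st.2 - (PySem.List.pyGet? s (i : Int)).getD 0))
      ([], s.sum)
    = ((List.range k).map (fun i => (s.drop i).sum), (s.drop k).sum) := by
  induction k with
  | zero => simp
  | succ k ih =>
    have hk' : k < s.length := by omega
    rw [List.range_succ, List.foldl_append, ih (by omega), List.map_append]
    have hdrop : s.drop k = s[k] :: s.drop (k + 1) := List.drop_eq_getElem_cons hk'
    have hget : (PySem.List.pyGet? s (k : Int)).getD 0 = s[k] := by
      simp [PySem.List.pyGet?_natCast, List.getElem?_eq_getElem hk']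
    simp only [List.foldl_cons, List.foldl_nil, hget, List.map_cons, List.map_nil]
    have hsum : (List.drop k s).sum - s[k] = (List.drop (k + 1) s).sum := by
      rw [hdrop, List.sum_cons]; ring
    rw [hsum]

-- ===== VERDICT (by name: the statement is the Claim_ definition above) =====
theorem apply_phase_spec : Claim_equal_apply_phase := by
  intro s phase _
  unfold Spec_apply_phase apply_phase apply_phase_alt
  rw [pv_loop_inv s s.length le_rfl]
  simp only [List.map_map]
  refine List.map_congr_left (fun i hi => ?_)
  simp [PySem.List.slice_from_natCast]
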